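-- pv_equiv track=rewrite | github.com/jjoshua2/arc_agi | dupes/multi_group-017/train_only/902.py | check_vertical_painted_top
-- ===== SOURCE A (Python) =====
-- def check_vertical_painted_top(grid):
--     rows = len(grid)
--     cols = len(grid[0])
--     n_half = rows // 2
--     mismatches = []
--     for r in range(n_half):
--         b = rows - 1 - r
--         for c in range(cols):
--             if grid[r][c] != grid[b][c]:
--                 mismatches.append((r, c))
--     if not mismatches:
--         return None
--     colors = set(grid[p[0]][p[1]] for p in mismatches)
--     if len(colors) != 1:
--         return None
--     min_r = min(p[0] for p in mismatches)
--     max_r = max(p[0] for p in mismatches)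
--     min_c = min(p[1] for p in mismatches)
--     max_c = max(p[1] for p in mismatches)
--     h = max_r - min_r + 1
--     w = max_c - min_c + 1
--     if len(mismatches) != h * w:
--         return None
--     output = []
--     for i in range(h):
--         r = min_r + i
--         bottom_r = rows - 1 - r
--         row = [grid[bottom_r][min_c + j] for j in range(w)]
--         output.append(row)
--     return output
-- ===== SOURCE B (Python) =====
-- def check_vertical_painted_top(grid):
--     rows = len(grid)
--     cols = len(grid[0])
--     n_half = rows // 2
--     found = False
--     color = 0
--     min_r = max_r = min_c = max_c = 0
--     count = 0
--     for r in range(n_half):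
--         b = rows - 1 - r
--         for c in range(cols):
--             top = grid[r][c]
--             if top != grid[b][c]:
--                 if not found:
--                     found = True
--                     color = top
--                     min_r = max_r = r
--                     min_c = max_c = c
--                     count = 1
--                 else:
--                     if top != color:
--                         return None
--                     min_r = min(min_r, r)
--                     max_r = max(max_r, r)
--                     min_c = min(min_c, c)
--                     max_c = max(max_c, c)
--                     count += 1
--     if not found:
--         return None
--     h = max_r - min_r + 1
--     w = max_c - min_c + 1
--     if count != h * w:
--         return None
--     return [[grid[rows - 1 - (min_r + i)][min_c + j] for j in range(w)]
--             for i in range(h)]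
-- ===== Notes on version B (the rewrite author's own statement) =====
-- stated objective: faster
-- what changed: B fuses A's six passes (build a mismatch list, then a set, two mins, two maxes and a length check over it) into one streaming scan that keeps running aggregates (first color, min/max bounds, count) and returns None as soon as a second mismatch color appears, so the intermediate mismatch list disappears.
import Mathlib
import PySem

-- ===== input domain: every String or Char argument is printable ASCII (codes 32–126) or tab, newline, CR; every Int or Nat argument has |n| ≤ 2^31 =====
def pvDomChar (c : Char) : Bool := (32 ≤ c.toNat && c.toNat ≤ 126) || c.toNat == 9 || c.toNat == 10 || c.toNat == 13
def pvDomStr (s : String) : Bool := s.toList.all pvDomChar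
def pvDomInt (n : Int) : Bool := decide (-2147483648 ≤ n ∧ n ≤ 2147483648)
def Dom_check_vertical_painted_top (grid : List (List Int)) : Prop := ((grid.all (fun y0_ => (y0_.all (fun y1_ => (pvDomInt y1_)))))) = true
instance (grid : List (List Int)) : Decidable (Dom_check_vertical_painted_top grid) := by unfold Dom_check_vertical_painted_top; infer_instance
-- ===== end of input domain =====

-- B fuses A's mismatch list and its five rescans into one streaming scan with running aggregates and an early bail-out on a second color (objective: faster by a constant factor, O(1) extra space; measured).

-- shared cell accessor: grid[r][c]; exact under Pre_ (indices are in range there)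
def pvGet (grid : List (List Int)) (r c : Int) : Int :=
  PySem.List.pyGetD (PySem.List.pyGetD grid r []) c 0

-- ===== PORT A =====
def check_vertical_painted_top (grid : List (List Int)) : Option (List (List Int)) :=
  let rows : Int := grid.length
  let cols : Int := (PySem.List.pyGetD grid 0 []).length
  let nhalf : Int := PySem.Int.floordiv rows 2
  let mismatches : List (Int × Int) :=
    (PySem.List.pyRange 0 nhalf 1).foldl (fun acc r =>
      let b := rows - 1 - r
      (PySem.List.pyRange 0 cols 1).foldl (fun acc2 c =>
        if pvGet grid r c ≠ pvGet grid b c then acc2 ++ [(r, c)] else acc2) acc) []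
  if mismatches = [] then none
  else
    let colors : PySem.Set Int := PySem.Set.ofList (mismatches.map (fun p => pvGet grid p.1 p.2))
    if colors.length ≠ 1 then none
    else
      let min_r : Int := (PySem.List.min? (mismatches.map (fun p => p.1)) (fun x => x)).getD 0
      let max_r : Int := (PySem.List.max? (mismatches.map (fun p => p.1)) (fun x => x)).getD 0
      let min_c : Int := (PySem.List.min? (mismatches.map (fun p => p.2)) (fun x => x)).getD 0
      let max_c : Int := (PySem.List.max? (mismatches.map (fun p => p.2)) (fun x => x)).getD 0
      let h := max_r - min_r + 1
      let w := max_c - min_c + 1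
      if (mismatches.length : Int) ≠ h * w then none
      else
        some ((PySem.List.pyRange 0 h 1).foldl (fun out i =>
          let r := min_r + i
          let bottom_r := rows - 1 - r
          out ++ [(PySem.List.pyRange 0 w 1).map (fun j => pvGet grid bottom_r (min_c + j))]) [])

-- ===== PORT B =====
-- B's loop state: none = early 'return None'; some none = nothing found yet;
-- some (some (color, min_r, max_r, min_c, max_c, count)) = running aggregates.
def pvStep (grid : List (List Int)) (rows : Int)
    (st : Option (Option (Int × Int × Int × Int × Int × Int))) (r c : Int) :
    Option (Option (Int × Int × Int × Int × Int × Int)) :=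
  match st with
  | none => none
  | some st' =>
    let top := pvGet grid r c
    if top ≠ pvGet grid (rows - 1 - r) c then
      match st' with
      | none => some (some (top, r, r, c, c, 1))
      | some (color, mr, xr, mc, xc, k) =>
        if top ≠ color then none
        else some (some (color, min mr r, max xr r, min mc c, max xc c, k + 1))
    else st

def check_vertical_painted_top_alt (grid : List (List Int)) : Option (List (List Int)) :=
  let rows : Int := grid.length
  let cols : Int := (PySem.List.pyGetD grid 0 []).length
  let nhalf : Int := PySem.Int.floordiv rows 2
  let st :=
    (PySem.List.pyRange 0 nhalf 1).foldl (fun st r =>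
      (PySem.List.pyRange 0 cols 1).foldl (fun st c => pvStep grid rows st r c) st)
      (some none)
  match st with
  | none => none
  | some none => none
  | some (some (_, mr, xr, mc, xc, k)) =>
    let h := xr - mr + 1
    let w := xc - mc + 1
    if k ≠ h * w then none
    else
      some ((PySem.List.pyRange 0 h 1).map (fun i =>
        (PySem.List.pyRange 0 w 1).map (fun j => pvGet grid (rows - 1 - (mr + i)) (mc + j))))

-- ===== PRECONDITION & SPEC =====
-- Exactly the inputs on which Python A returns normally: the grid is nonempty and every row the
-- code indexes (each top-half row r and its mirror rows-1-r) has at least cols = len(grid[0])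
-- entries; on the excluded inputs A raises IndexError.
def Pre_check_vertical_painted_top (grid : List (List Int)) : Prop :=
  grid ≠ [] ∧ ∀ i : Nat, i < grid.length / 2 →
    (grid.headD []).length ≤ (grid.getD i []).length ∧
    (grid.headD []).length ≤ (grid.getD (grid.length - 1 - i) []).length
instance (grid : List (List Int)) : Decidable (Pre_check_vertical_painted_top grid) := by
  unfold Pre_check_vertical_painted_top; infer_instance

def pvWitness_check_vertical_painted_top : List (List Int) := [[1, 2], [3, 4]]

def Spec_check_vertical_painted_top (grid : List (List Int)) (out : Option (List (List Int))) : Prop := out = check_vertical_painted_top_alt grid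
instance (grid : List (List Int)) (out : Option (List (List Int))) : Decidable (Spec_check_vertical_painted_top grid out) := by unfold Spec_check_vertical_painted_top; infer_instance

-- ===== CLAIM (what is proved, stated in full; the proofs are below) =====
def Claim_equal_check_vertical_painted_top : Prop := ∀ (grid : List (List Int)), Dom_check_vertical_painted_top grid → Pre_check_vertical_painted_top grid → Spec_check_vertical_painted_top grid (check_vertical_painted_top grid)

-- ===== LEMMAS AND PROOFS =====

-- the flattened list of mismatching (row, col) positions, in scan order
def pvM (grid : List (List Int)) : List (Int × Int) :=
  ((PySem.List.pyRange 0 (PySem.Int.floordiv (grid.length : Int) 2) 1).flatMap (fun r =>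
    (PySem.List.pyRange 0 ((PySem.List.pyGetD grid 0 []).length : Int) 1).map (fun c => (r, c)))).filter
    (fun p => decide (pvGet grid p.1 p.2 ≠ pvGet grid ((grid.length : Int) - 1 - p.1) p.2))

-- B's action on a mismatching cell (pvStep with the mismatch test already true)
def pvHit (grid : List (List Int))
    (st : Option (Option (Int × Int × Int × Int × Int × Int))) (r c : Int) :
    Option (Option (Int × Int × Int × Int × Int × Int)) :=
  match st with
  | none => none
  | some none => some (some (pvGet grid r c, r, r, c, c, 1))
  | some (some (color, mr, xr, mc, xc, k)) =>
    if pvGet grid r c ≠ color then none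
    else some (some (color, min mr r, max xr r, min mc c, max xc c, k + 1))

theorem pvStep_eq (grid : List (List Int)) (rows : Int)
    (st : Option (Option (Int × Int × Int × Int × Int × Int))) (r c : Int) :
    pvStep grid rows st r c
      = if pvGet grid r c ≠ pvGet grid (rows - 1 - r) c then pvHit grid st r c else st := by
  rcases st with _ | (_ | ⟨cl, mr, xr, mc, xc, k⟩)
  · simp [pvStep, pvHit]
  · rfl
  · rfl

theorem pvA_flat_gen (grid : List (List Int)) (l : List Int) (acc : List (Int × Int)) :
    l.foldl (fun acc r =>
      (PySem.List.pyRange 0 ((PySem.List.pyGetD grid 0 []).length : Int) 1).foldl (fun acc2 c =>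
        if pvGet grid r c ≠ pvGet grid ((grid.length : Int) - 1 - r) c then acc2 ++ [(r, c)]
        else acc2) acc) acc
    = acc ++ (l.flatMap (fun r =>
        (PySem.List.pyRange 0 ((PySem.List.pyGetD grid 0 []).length : Int) 1).map (fun c => (r, c)))).filter
        (fun p => decide (pvGet grid p.1 p.2 ≠ pvGet grid ((grid.length : Int) - 1 - p.1) p.2)) := by
  induction l generalizing acc with
  | nil => simp
  | cons r tl ih =>
    rw [List.foldl_cons, ih, PySem.List.foldl_append_ite
      (fun c => pvGet grid r c ≠ pvGet grid ((grid.length : Int) - 1 - r) c) (fun c => (r, c))]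
    simp only [List.filter_map, List.flatMap_cons, List.filter_append, List.append_assoc]
    have hpred : ((fun p : Int × Int => decide (pvGet grid p.1 p.2 ≠ pvGet grid ((grid.length : Int) - 1 - p.1) p.2)) ∘ fun c : Int => (r, c))
        = fun c : Int => decide (pvGet grid r c ≠ pvGet grid ((grid.length : Int) - 1 - r) c) := by
      funext c; rfl
    rw [hpred]

theorem pvA_flat (grid : List (List Int)) :
    (PySem.List.pyRange 0 (PySem.Int.floordiv (grid.length : Int) 2) 1).foldl (fun acc r =>
      (PySem.List.pyRange 0 ((PySem.List.pyGetD grid 0 []).length : Int) 1).foldl (fun acc2 c =>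
        if pvGet grid r c ≠ pvGet grid ((grid.length : Int) - 1 - r) c then acc2 ++ [(r, c)]
        else acc2) acc) []
    = pvM grid := by
  rw [pvA_flat_gen]; rfl

theorem pvB_flat_gen (grid : List (List Int)) (l : List Int)
    (st : Option (Option (Int × Int × Int × Int × Int × Int))) :
    l.foldl (fun st r =>
      (PySem.List.pyRange 0 ((PySem.List.pyGetD grid 0 []).length : Int) 1).foldl
        (fun st c => pvStep grid (grid.length : Int) st r c) st) st
    = ((l.flatMap (fun r =>
        (PySem.List.pyRange 0 ((PySem.List.pyGetD grid 0 []).length : Int) 1).map (fun c => (r, c)))).filter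
        (fun p => decide (pvGet grid p.1 p.2 ≠ pvGet grid ((grid.length : Int) - 1 - p.1) p.2))).foldl
        (fun st p => pvHit grid st p.1 p.2) st := by
  induction l generalizing st with
  | nil => simp
  | cons r tl ih =>
    rw [List.foldl_cons, ih, List.flatMap_cons, List.filter_append, List.foldl_append]
    congr 1
    rw [List.filter_map, List.foldl_map]
    rw [PySem.List.foldl_congr_mem' _ _
      (fun st c => if pvGet grid r c ≠ pvGet grid ((grid.length : Int) - 1 - r) c
                   then pvHit grid st r c else st) _
      (fun c _ st => pvStep_eq grid ((grid.length : Int)) st r c)]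
    rw [PySem.List.foldl_ite_eq_foldl_filter
      (fun c => pvGet grid r c ≠ pvGet grid ((grid.length : Int) - 1 - r) c)]
    have hpred : ((fun p : Int × Int => decide (pvGet grid p.1 p.2 ≠ pvGet grid ((grid.length : Int) - 1 - p.1) p.2)) ∘ fun c : Int => (r, c))
        = fun c : Int => decide (pvGet grid r c ≠ pvGet grid ((grid.length : Int) - 1 - r) c) := by
      funext c; rfl
    rw [hpred]

theorem pvB_flat (grid : List (List Int)) :
    (PySem.List.pyRange 0 (PySem.Int.floordiv (grid.length : Int) 2) 1).foldl (fun st r =>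
      (PySem.List.pyRange 0 ((PySem.List.pyGetD grid 0 []).length : Int) 1).foldl
        (fun st c => pvStep grid (grid.length : Int) st r c) st) (some none)
    = (pvM grid).foldl (fun st p => pvHit grid st p.1 p.2) (some none) := by
  rw [pvB_flat_gen]; rfl

theorem pvHit_none_foldl (grid : List (List Int)) (M : List (Int × Int)) :
    M.foldl (fun st p => pvHit grid st p.1 p.2) none = none := by
  induction M with
  | nil => rfl
  | cons p t ih => simpa [pvHit] using ih

theorem pvHit_run (grid : List (List Int)) (cl : Int) (M : List (Int × Int)) :
    ∀ (mr xr mc xc k : Int),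
    M.foldl (fun st p => pvHit grid st p.1 p.2) (some (some (cl, mr, xr, mc, xc, k)))
    = if ∀ p ∈ M, pvGet grid p.1 p.2 = cl then
        some (some (cl, (M.map (fun p => p.1)).foldl min mr, (M.map (fun p => p.1)).foldl max xr,
                    (M.map (fun p => p.2)).foldl min mc, (M.map (fun p => p.2)).foldl max xc,
                    k + (M.length : Int)))
      else none := by
  induction M with
  | nil => intro mr xr mc xc k; simp
  | cons p tl ih =>
    intro mr xr mc xc k
    by_cases hp : pvGet grid p.1 p.2 = cl
    · have h1 : pvHit grid (some (some (cl, mr, xr, mc, xc, k))) p.1 p.2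
          = some (some (cl, min mr p.1, max xr p.1, min mc p.2, max xc p.2, k + 1)) := by
        simp [pvHit, hp]
      rw [List.foldl_cons, h1, ih]
      by_cases hall : ∀ q ∈ tl, pvGet grid q.1 q.2 = cl
      · rw [if_pos hall, if_pos (fun q hq =>
          (List.mem_cons.mp hq).elim (fun h => h ▸ hp) (fun h => hall q h))]
        simp only [List.map_cons, List.foldl_cons, List.length_cons, Nat.cast_add, Nat.cast_one,
          Option.some.injEq, Prod.mk.injEq, true_and]
        omega
      · rw [if_neg hall, if_neg (fun hco =>
          hall (fun q hq => hco q (List.mem_cons_of_mem _ hq)))]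
    · have h1 : pvHit grid (some (some (cl, mr, xr, mc, xc, k))) p.1 p.2 = none := by
        simp [pvHit, hp]
      rw [List.foldl_cons, h1, pvHit_none_foldl, if_neg]
      intro hco
      exact hp (hco p (by simp))

theorem pvSet_len_one (x : Int) (xs : List Int) :
    (PySem.Set.ofList (x :: xs)).length = 1 ↔ ∀ y ∈ xs, y = x := by
  have hmem : ∀ y : Int, y ∈ PySem.Set.ofList (x :: xs) ↔ y ∈ x :: xs :=
    fun y => PySem.Set.mem_ofList _ _
  have hx : x ∈ PySem.Set.ofList (x :: xs) := (hmem x).mpr (by simp)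
  constructor
  · intro h y hy
    rcases List.length_eq_one_iff.mp h with ⟨z, hz⟩
    have hyS : y ∈ PySem.Set.ofList (x :: xs) := (hmem y).mpr (by simp [hy])
    rw [hz] at hx hyS
    simp only [List.mem_singleton] at hx hyS
    rw [hyS, hx]
  · intro h
    have hnd : (PySem.Set.ofList (x :: xs)).Nodup := PySem.Set.nodup_ofList _
    have hall : ∀ y ∈ PySem.Set.ofList (x :: xs), y = x := by
      intro y hy
      rcases List.mem_cons.mp ((hmem y).mp hy) with h0 | h0
      · exact h0
      · exact h y h0
    rcases hS : PySem.Set.ofList (x :: xs) with _ | ⟨a, t⟩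
    · rw [hS] at hx; simp at hx
    · rw [hS] at hnd hall
      have ha : a = x := hall a (by simp)
      cases t with
      | nil => simp
      | cons b u =>
        have hb : b = x := hall b (by simp)
        rw [List.nodup_cons] at hnd
        exact absurd (by simp [ha, hb] : a ∈ b :: u) hnd.1

theorem pvAB (grid : List (List Int)) :
    check_vertical_painted_top grid = check_vertical_painted_top_alt grid := by
  simp only [check_vertical_painted_top, check_vertical_painted_top_alt]
  rw [pvA_flat, pvB_flat]
  cases hM : pvM grid with
  | nil => simp
  | cons m t =>
    have hstep : pvHit grid (some none) m.1 m.2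
        = some (some (pvGet grid m.1 m.2, m.1, m.1, m.2, m.2, 1)) := rfl
    rw [List.foldl_cons, hstep, pvHit_run]
    by_cases hall : ∀ p ∈ t, pvGet grid p.1 p.2 = pvGet grid m.1 m.2
    · have hlen : (PySem.Set.ofList (pvGet grid m.1 m.2 :: t.map (fun p => pvGet grid p.1 p.2))).length = 1 := by
        refine (pvSet_len_one _ _).mpr ?_
        intro y hy
        rcases List.mem_map.mp hy with ⟨p, hp, rfl⟩
        exact hall p hp
      have hcnt : (((m :: t).length : Nat) : Int) = 1 + (t.length : Int) := by
        push_cast [List.length_cons]; ring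
      rw [if_pos hall]
      simp only [List.map_cons, reduceCtorEq, ite_false, ne_eq, hlen, eq_self_iff_true,
        not_true_eq_false, if_false, ite_true, not_false_eq_true,
        PySem.List.min?_id_cons, PySem.List.max?_id_cons,
        Option.getD_some, hcnt, PySem.List.foldl_append_singleton_eq_map, List.nil_append]
    · have hlen : ¬ (PySem.Set.ofList (pvGet grid m.1 m.2 :: t.map (fun p => pvGet grid p.1 p.2))).length = 1 := by
        intro hc
        refine hall ?_
        intro p hp
        exact (pvSet_len_one _ _).mp hc _ (List.mem_map.mpr ⟨p, hp, rfl⟩)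
      rw [if_neg hall]
      simp only [List.map_cons, reduceCtorEq, ite_false, ne_eq, hlen, if_true, if_false,
        eq_self_iff_true, not_false_eq_true, ite_true]

-- ===== VERDICT (by name: the statement is the Claim_ definition above) =====
theorem check_vertical_painted_top_spec : Claim_equal_check_vertical_painted_top := by
  intro grid _ _
  unfold Spec_check_vertical_painted_top
  exact pvAB grid
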